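-- pv_equiv track=rewrite | github.com/10zinten/pedurma-double-tsek | dtsek/extract_dtsek_from_image.py | find_double_tsek_bf
-- ===== SOURCE A (Python) =====
-- def cls_box_into_line(boxes, th=20):
--     lines = []
--     line = []
--     prev_y1 = boxes[0][1]
--     for box in boxes:
--         if abs(box[1] - prev_y1) < th:
--             line.append(box)
--         else:
--             lines.append(line)
--             line = []
--             line.append(box)
--         prev_y1 = box[1]
--     else:
--         if line: lines.append(line)
--     return lines
--
-- def find_double_tsek_bf(matched_box, boxes, th=20):
--     box_lines = cls_box_into_line(boxes)
--     pos = 0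
--     prev_x1 = 0
--     for box_line in box_lines:
--         if abs(matched_box[1] - box_line[0][1]) < th:
--             for i, box in enumerate(box_line):
--                 if matched_box[0] > prev_x1 and matched_box[0] < box[0]:
--                     pos += i-1
--                     return pos
--         pos += len(box_line)
-- ===== SOURCE B (Python) =====
-- def find_double_tsek_bf(matched_box, boxes, th=20):
--     # single streaming pass: fuses line grouping and the position scan,
--     # no intermediate lines list is built
--     prev_y1 = boxes[0][1]
--     line_match = abs(matched_box[1] - prev_y1) < th
--     g = 0
--     for box in boxes:
--         if abs(box[1] - prev_y1) >= 20:
--             line_match = abs(matched_box[1] - box[1]) < th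
--         if line_match and 0 < matched_box[0] < box[0]:
--             return g - 1
--         prev_y1 = box[1]
--         g += 1
--     return None
-- ===== Notes on version B (the rewrite author's own statement) =====
-- stated objective: alternative
-- what changed: Replaces the two-phase build-lines-then-scan (cls_box_into_line producing a list of line groups, then a nested scan over lines and boxes) with one streaming pass over the boxes that tracks the current line's match flag and a global index, building no intermediate structure.
import Mathlib
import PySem

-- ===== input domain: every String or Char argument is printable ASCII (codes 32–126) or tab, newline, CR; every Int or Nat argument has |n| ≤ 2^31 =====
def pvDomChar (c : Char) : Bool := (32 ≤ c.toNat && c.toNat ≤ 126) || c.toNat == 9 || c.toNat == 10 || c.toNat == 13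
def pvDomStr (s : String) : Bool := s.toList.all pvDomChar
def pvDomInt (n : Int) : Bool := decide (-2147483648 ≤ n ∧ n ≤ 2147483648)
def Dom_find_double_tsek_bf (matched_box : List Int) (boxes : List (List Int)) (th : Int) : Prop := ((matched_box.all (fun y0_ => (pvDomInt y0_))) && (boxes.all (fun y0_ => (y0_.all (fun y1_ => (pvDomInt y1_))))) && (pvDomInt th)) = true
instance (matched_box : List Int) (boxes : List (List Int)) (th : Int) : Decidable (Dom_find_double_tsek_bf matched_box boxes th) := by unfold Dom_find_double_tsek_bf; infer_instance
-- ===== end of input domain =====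

-- B fuses A's build-lines-then-scan into one streaming pass over the boxes (no
-- intermediate lines list); same return value wherever A returns (alternative
-- decomposition, same O(n) cost).

-- shared indexing helper: b[i] (Pre_ guarantees the index is in range)
def getI (b : List Int) (i : Int) : Int := (PySem.List.pyGet? b i).getD 0

-- ===== PORT A =====
-- loop of cls_box_into_line
def clsLoop (th : Int) : List (List Int) → List (List (List Int)) → List (List Int) → Int → List (List (List Int))
  | [], lines, line, _ => if line.isEmpty then lines else lines ++ [line]
  | b :: rest, lines, line, prev =>
    if |getI b 1 - prev| < th then clsLoop th rest lines (line ++ [b]) (getI b 1)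
    else clsLoop th rest (lines ++ [line]) [b] (getI b 1)

def cls_box_into_line (boxes : List (List Int)) (th : Int) : List (List (List Int)) :=
  clsLoop th boxes [] [] (getI ((PySem.List.pyGet? boxes 0).getD []) 1)

-- inner 'for i, box in enumerate(box_line)' loop
def innerLoop (mb0 px : Int) : List (List Int) → Int → Option Int
  | [], _ => none
  | b :: rest, i => if mb0 > px ∧ mb0 < getI b 0 then some i else innerLoop mb0 px rest (i + 1)

-- outer 'for box_line in box_lines' loop
def findLoop (mb : List Int) (th : Int) : List (List (List Int)) → Int → Int → Option Int
  | [], _, _ => none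
  | bl :: rest, pos, px =>
    if |getI mb 1 - getI (bl.headD []) 1| < th then
      match innerLoop (getI mb 0) px bl 0 with
      | some i => some (pos + i - 1)
      | none => findLoop mb th rest (pos + (bl.length : Int)) px
    else findLoop mb th rest (pos + (bl.length : Int)) px

def find_double_tsek_bf (matched_box : List Int) (boxes : List (List Int)) (th : Int) : Option Int :=
  findLoop matched_box th (cls_box_into_line boxes 20) 0 0

-- ===== PORT B =====
def altLoop (mb : List Int) (th : Int) : List (List Int) → Int → Int → Bool → Option Int
  | [], _, _, _ => none
  | b :: rest, prev, g, lm =>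
    let lm' := if 20 ≤ |getI b 1 - prev| then decide (|getI mb 1 - getI b 1| < th) else lm
    if lm' ∧ 0 < getI mb 0 ∧ getI mb 0 < getI b 0 then some (g - 1)
    else altLoop mb th rest (getI b 1) (g + 1) lm'

def find_double_tsek_bf_alt (matched_box : List Int) (boxes : List (List Int)) (th : Int) : Option Int :=
  let y0 := getI ((PySem.List.pyGet? boxes 0).getD []) 1
  altLoop matched_box th boxes y0 0 (decide (|getI matched_box 1 - y0| < th))

-- ===== PRECONDITION & SPEC =====
-- exactly where the Python A returns: it raises IndexError on empty boxes, on a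
-- matched_box shorter than 2 (matched_box[1] is read for the first line), and on
-- any box shorter than 2 (box[1] is read for every box)
def Pre_find_double_tsek_bf (matched_box : List Int) (boxes : List (List Int)) (th : Int) : Prop :=
  boxes ≠ [] ∧ 2 ≤ matched_box.length ∧ ∀ b ∈ boxes, 2 ≤ b.length
instance (matched_box : List Int) (boxes : List (List Int)) (th : Int) : Decidable (Pre_find_double_tsek_bf matched_box boxes th) := by unfold Pre_find_double_tsek_bf; infer_instance
def pvWitness_find_double_tsek_bf : List Int × List (List Int) × Int := ([5, 3], [[1, 2], [9, 40]], 20)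

def Spec_find_double_tsek_bf (matched_box : List Int) (boxes : List (List Int)) (th : Int) (out : Option Int) : Prop := out = find_double_tsek_bf_alt matched_box boxes th
instance (matched_box : List Int) (boxes : List (List Int)) (th : Int) (out : Option Int) : Decidable (Spec_find_double_tsek_bf matched_box boxes th out) := by unfold Spec_find_double_tsek_bf; infer_instance

-- ===== CLAIM (what is proved, stated in full; the proofs are below) =====
def Claim_equal_find_double_tsek_bf : Prop := ∀ (matched_box : List Int) (boxes : List (List Int)) (th : Int), Dom_find_double_tsek_bf matched_box boxes th → Pre_find_double_tsek_bf matched_box boxes th → Spec_find_double_tsek_bf matched_box boxes th (find_double_tsek_bf matched_box boxes th)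

-- ===== LEMMAS AND PROOFS =====

-- the lines accumulator of clsLoop is only ever appended to
lemma cls_acc (th : Int) : ∀ (rest : List (List Int)) (A : List (List (List Int))) (line : List (List Int)) (prev : Int),
    clsLoop th rest A line prev = A ++ clsLoop th rest [] line prev := by
  intro rest
  induction rest with
  | nil => intro A line prev; simp [clsLoop]; split <;> simp
  | cons b rest ih =>
    intro A line prev
    simp only [clsLoop]
    split
    · rw [ih, ih [] (line ++ [b])]
    · simp only [List.nil_append]
      rw [ih (A ++ [line]), ih [line]]
      simp

-- the first emitted line extends the current partial line
lemma cls_first (th : Int) : ∀ (rest line : List (List Int)) (prev : Int), line ≠ [] →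
    ∃ ext rest', clsLoop th rest [] line prev = (line ++ ext) :: rest' := by
  intro rest
  induction rest with
  | nil => intro line prev h; exact ⟨[], [], by simp [clsLoop, h]⟩
  | cons b rest ih =>
    intro line prev h
    simp only [clsLoop]
    split
    · obtain ⟨ext, rest', hr⟩ := ih (line ++ [b]) (getI b 1) (by simp)
      exact ⟨[b] ++ ext, rest', by rw [hr]; simp⟩
    · exact ⟨[], clsLoop th rest [] [b] (getI b 1), by rw [cls_acc]; simp⟩

lemma headD_append_left {α : Type} (xs ys : List α) (d : α) (h : xs ≠ []) :
    (xs ++ ys).headD d = xs.headD d := by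
  cases xs with
  | nil => exact absurd rfl h
  | cons a t => rfl

def noTrig (mb : List Int) (line : List (List Int)) : Prop :=
  ∀ b ∈ line, ¬(getI mb 0 > 0 ∧ getI mb 0 < getI b 0)

lemma inner_noTrig (mb : List Int) : ∀ (pre rest : List (List Int)) (i : Int), noTrig mb pre →
    innerLoop (getI mb 0) 0 (pre ++ rest) i = innerLoop (getI mb 0) 0 rest (i + (pre.length : Int)) := by
  intro pre
  induction pre with
  | nil => intro rest i _; simp [innerLoop]
  | cons c pre ih =>
    intro rest i h
    have hc := h c (by simp)
    simp only [List.cons_append, innerLoop, if_neg hc]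
    rw [ih rest (i + 1) (fun b hb => h b (by simp [hb]))]
    congr 1
    simp only [List.length_cons]
    push_cast
    ring

-- if the head of the current line matches and its first trigger is the last box,
-- the A-side scan returns pos + (index of that box in its line) - 1
lemma find_first_hit (mb : List Int) (th : Int) (rest : List (List Int)) (pre : List (List Int))
    (b : List Int) (prev pos : Int)
    (hpre : noTrig mb pre)
    (hb : getI mb 0 > 0 ∧ getI mb 0 < getI b 0)
    (hm : |getI mb 1 - getI ((pre ++ [b]).headD []) 1| < th) :
    findLoop mb th (clsLoop 20 rest [] (pre ++ [b]) prev) pos 0 = some (pos + (pre.length : Int) - 1) := by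
  obtain ⟨ext, rest', hr⟩ := cls_first 20 rest (pre ++ [b]) prev (by simp)
  rw [hr]
  simp only [findLoop]
  rw [headD_append_left _ _ _ (by simp), if_pos hm]
  have : pre ++ [b] ++ ext = pre ++ (b :: ext) := by simp
  rw [this, inner_noTrig mb pre (b :: ext) 0 hpre]
  simp [innerLoop, if_pos hb]

-- main invariant: the streaming loop at state (prev, g, lm) with a nonempty
-- current line agrees with the A-side scan of the remaining emitted lines
lemma main_inv (mb : List Int) (th : Int) : ∀ (rest line : List (List Int)) (prev g : Int) (lm : Bool),
    line ≠ [] →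
    lm = decide (|getI mb 1 - getI (line.headD []) 1| < th) →
    (lm = true → noTrig mb line) →
    findLoop mb th (clsLoop 20 rest [] line prev) (g - (line.length : Int)) 0 = altLoop mb th rest prev g lm := by
  intro rest
  induction rest with
  | nil =>
    intro line prev g lm hne hlm hnt
    have hcls : clsLoop 20 [] ([] : List (List (List Int))) line prev = [line] := by
      simp [clsLoop, hne]
    rw [hcls]
    simp only [altLoop, findLoop]
    by_cases hm : |getI mb 1 - getI (line.headD []) 1| < th
    · rw [if_pos hm]
      have hnt' := hnt (by rw [hlm]; simpa using hm)
      have : innerLoop (getI mb 0) 0 line 0 = none := by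
        have := inner_noTrig mb line [] 0 hnt'
        simpa using this
      rw [this]
    · rw [if_neg hm]
  | cons b rest ih =>
    intro line prev g lm hne hlm hnt
    simp only [clsLoop, altLoop]
    by_cases hy : |getI b 1 - prev| < 20
    · -- same line
      rw [if_pos hy, if_neg (by omega : ¬ (20 ≤ |getI b 1 - prev|))]
      by_cases htr : (lm : Prop) ∧ 0 < getI mb 0 ∧ getI mb 0 < getI b 0
      · rw [if_pos htr]
        obtain ⟨hlmt, htr'⟩ := htr
        have hm : |getI mb 1 - getI (line.headD []) 1| < th := by
          have := hlm ▸ hlmt; simpa using this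
        have := find_first_hit mb th rest line b (getI b 1) (g - (line.length : Int))
          (hnt hlmt) ⟨htr'.1, htr'.2⟩
          (by rwa [headD_append_left _ _ _ hne])
        rw [this]
        congr 1
        ring
      · rw [if_neg htr]
        have hstep := ih (line ++ [b]) (getI b 1) (g + 1) lm (by simp)
          (by rw [hlm, headD_append_left _ _ _ hne])
          (by
            intro hlmt c hc
            rcases List.mem_append.mp hc with h1 | h1
            · exact hnt hlmt c h1
            · simp at h1; subst h1
              intro hcc
              exact htr ⟨by simp [hlmt], hcc.1, hcc.2⟩)
        have harith : g + 1 - ((line ++ [b]).length : Int) = g - (line.length : Int) := by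
          simp
        rw [harith] at hstep
        exact hstep
    · -- new line starts at b
      rw [if_neg hy, if_pos (by omega : 20 ≤ |getI b 1 - prev|)]
      rw [cls_acc]
      have hskip : findLoop mb th (line :: clsLoop 20 rest [] [b] (getI b 1)) (g - (line.length : Int)) 0
          = findLoop mb th (clsLoop 20 rest [] [b] (getI b 1)) g 0 := by
        simp only [findLoop]
        by_cases hm : |getI mb 1 - getI (line.headD []) 1| < th
        · rw [if_pos hm]
          have hnt' := hnt (by rw [hlm]; simpa using hm)
          have : innerLoop (getI mb 0) 0 line 0 = none := by
            have := inner_noTrig mb line [] 0 hnt'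
            simpa using this
          rw [this, (by ring : g - (line.length : Int) + (line.length : Int) = g)]
        · rw [if_neg hm, (by ring : g - (line.length : Int) + (line.length : Int) = g)]
      simp only [List.nil_append, List.singleton_append]
      rw [hskip]
      set lm' := decide (|getI mb 1 - getI b 1| < th) with hlm'
      by_cases htr : (lm' : Prop) ∧ 0 < getI mb 0 ∧ getI mb 0 < getI b 0
      · rw [if_pos htr]
        have hm : |getI mb 1 - getI b 1| < th := by
          have := hlm' ▸ htr.1; simpa using this
        have := find_first_hit mb th rest [] b (getI b 1) g
          (by intro c hc; simp at hc) ⟨htr.2.1, htr.2.2⟩ (by simpa using hm)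
        simpa using this
      · rw [if_neg htr]
        have hstep := ih [b] (getI b 1) (g + 1) lm' (by simp) (by simp [hlm'])
          (by
            intro hlmt c hc
            simp at hc; subst hc
            intro hcc
            exact htr ⟨by simp [hlmt], hcc.1, hcc.2⟩)
        simpa using hstep

-- full unconditional agreement of the two ports
lemma ports_agree (mb : List Int) (boxes : List (List Int)) (th : Int) :
    find_double_tsek_bf mb boxes th = find_double_tsek_bf_alt mb boxes th := by
  cases boxes with
  | nil => simp [find_double_tsek_bf, find_double_tsek_bf_alt, cls_box_into_line, clsLoop, findLoop, altLoop]
  | cons b rest =>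
    simp only [find_double_tsek_bf, find_double_tsek_bf_alt, cls_box_into_line]
    have h0 : (PySem.List.pyGet? (b :: rest) 0).getD [] = b := by
      simp [PySem.List.pyGet?, PySem.List.pyIdx?]
    rw [h0]
    simp only [clsLoop, altLoop]
    rw [if_pos (by simp : |getI b 1 - getI b 1| < 20),
        if_neg (by simp : ¬ (20 ≤ |getI b 1 - getI b 1|))]
    set lm0 := decide (|getI mb 1 - getI b 1| < th) with hlm0
    by_cases htr : (lm0 : Prop) ∧ 0 < getI mb 0 ∧ getI mb 0 < getI b 0
    · rw [if_pos htr]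
      have hm : |getI mb 1 - getI b 1| < th := by
        have := hlm0 ▸ htr.1; simpa using this
      have := find_first_hit mb th rest [] b (getI b 1) 0
        (by intro c hc; simp at hc) ⟨htr.2.1, htr.2.2⟩ (by simpa using hm)
      simpa using this
    · rw [if_neg htr]
      have hstep := main_inv mb th rest [b] (getI b 1) 1 lm0 (by simp) (by simp [hlm0])
        (by
          intro hlmt c hc
          simp at hc; subst hc
          intro hcc
          exact htr ⟨by simp [hlmt], hcc.1, hcc.2⟩)
      simpa using hstep

-- ===== VERDICT (by name: the statement is the Claim_ definition above) =====
theorem find_double_tsek_bf_spec : Claim_equal_find_double_tsek_bf := by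
  intro mb boxes th _ _
  exact ports_agree mb boxes th
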